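-- pv_equiv track=rewrite | github.com/el-f/CS-Material-And-Snippets | Python Courses + Snippets/Snippets/egg_drop.py | max_determinable_height
-- ===== SOURCE A (Python) =====
-- def max_determinable_height(eggs, tries):
--     if eggs >= tries:
--         return (2 ** tries) - 1  # just do binary search
--
--     h, t = 0, 1
--     for k in range(1, eggs + 1):
--         t = t * (tries - k + 1) // k
--         h += t
--     return h
-- ===== SOURCE B (Python) =====
-- def max_determinable_height(eggs, tries):
--     if eggs >= tries:
--         return (2 ** tries) - 1  # just do binary search
--
--     if eggs <= 0:
--         return 0  # no eggs, no testable floors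
--
--     # Horner evaluation, back to front, of
--     #   C(t,1) + ... + C(t,e)  =  t * (1 + (t-1)/2 * (1 + (t-2)/3 * (... )))
--     # kept as ONE exact fraction num/den; a single division at the very end.
--     num, den = 1, 1
--     k = eggs - 1
--     while k > 0:
--         num, den = den * (k + 1) + (tries - k) * num, den * (k + 1)
--         k -= 1
--     return tries * num // den
-- ===== Notes on version B (the rewrite author's own statement) =====
-- stated objective: alternative
-- what changed: B replaces A's forward running-binomial for-loop (one floor-division per term) with a back-to-front Horner evaluation of the binomial sum, a while loop maintaining one exact fraction with a single division at the end.
-- outside the precondition, e.g. on max_determinable_height(-1, -2): A returns -0.75, B returns -0.75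
import Mathlib
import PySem

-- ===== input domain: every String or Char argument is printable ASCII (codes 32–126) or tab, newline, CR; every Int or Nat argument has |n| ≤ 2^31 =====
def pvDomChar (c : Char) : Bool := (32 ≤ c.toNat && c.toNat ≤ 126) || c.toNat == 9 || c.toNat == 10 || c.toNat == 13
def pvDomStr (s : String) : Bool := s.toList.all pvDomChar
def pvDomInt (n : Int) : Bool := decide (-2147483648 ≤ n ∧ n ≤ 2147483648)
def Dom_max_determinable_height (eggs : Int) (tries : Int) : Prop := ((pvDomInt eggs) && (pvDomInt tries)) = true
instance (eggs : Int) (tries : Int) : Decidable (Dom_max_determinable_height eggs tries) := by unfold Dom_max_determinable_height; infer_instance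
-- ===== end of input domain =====

-- B replaces A's forward running-binomial for-loop (one floor-division per term) by a
-- back-to-front Horner evaluation of the same binomial sum, a while loop maintaining one
-- exact fraction with a single final division; same O(eggs) cost (objective: alternative).


-- ===== PORT A =====
-- literal port of Source A: shortcut 2^tries - 1 when eggs >= tries (tries ≥ 0 there by Pre_,
-- so 2 ^ tries.toNat is exact); else the running-binomial for-loop with a floordiv each step.
def max_determinable_height (eggs : Int) (tries : Int) : Int :=
  if eggs ≥ tries then 2 ^ tries.toNat - 1
  else
    ((PySem.List.pyRange 1 (eggs + 1) 1).foldl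
      (fun (st : Int × Int) (k : Int) =>
        let t := PySem.Int.floordiv (st.2 * (tries - k + 1)) k
        (st.1 + t, t))
      (0, 1)).1

-- ===== PORT B =====
-- Source B's while loop 'while k > 0: num, den = den*(k+1) + (tries-k)*num, den*(k+1); k -= 1',
-- transliterated as structural recursion on the iteration count (the loop runs exactly
-- (eggs-1).toNat times: k counts down from eggs-1 to 1).
def pvHornerLoop (tries : Int) (k : Int) (num : Int) (den : Int) : Nat → Int × Int
  | 0 => (num, den)
  | n + 1 => pvHornerLoop tries (k - 1) (den * (k + 1) + (tries - k) * num) (den * (k + 1)) n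

-- literal port of Source B: same guard, eggs ≤ 0 short-circuit, then the while loop above
-- carrying the fraction (num, den), one floordiv at the very end.
def max_determinable_height_alt (eggs : Int) (tries : Int) : Int :=
  if eggs ≥ tries then 2 ^ tries.toNat - 1
  else if eggs ≤ 0 then 0
  else
    let st := pvHornerLoop tries (eggs - 1) 1 1 (eggs - 1).toNat
    PySem.Int.floordiv (tries * st.1) st.2

-- ===== PRECONDITION & SPEC =====
-- Pre_ excludes only eggs ≥ tries with tries < 0: there Python's 2 ** tries is a FLOAT
-- (e.g. -0.75), not an int of the declared return type.
def Pre_max_determinable_height (eggs : Int) (tries : Int) : Prop := 0 ≤ tries ∨ eggs < tries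
instance (eggs : Int) (tries : Int) : Decidable (Pre_max_determinable_height eggs tries) := by unfold Pre_max_determinable_height; infer_instance
def pvWitness_max_determinable_height : Int × Int := (3, 7)

def Spec_max_determinable_height (eggs : Int) (tries : Int) (out : Int) : Prop := out = max_determinable_height_alt eggs tries
instance (eggs : Int) (tries : Int) (out : Int) : Decidable (Spec_max_determinable_height eggs tries out) := by unfold Spec_max_determinable_height; infer_instance

-- ===== CLAIM (what is proved, stated in full; the proofs are below) =====
def Claim_equal_max_determinable_height : Prop := ∀ (eggs : Int) (tries : Int), Dom_max_determinable_height eggs tries → Pre_max_determinable_height eggs tries → Spec_max_determinable_height eggs tries (max_determinable_height eggs tries)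

-- ===== LEMMAS AND PROOFS =====

-- the common mathematical value: C(t,a) + C(t,a+1) + ... + C(t,b)
def pvSsum (t a b : Nat) : Nat := ∑ j ∈ Finset.Icc a b, Nat.choose t j

theorem pvSsum_self (t b : Nat) : pvSsum t b b = Nat.choose t b := by
  simp [pvSsum]

theorem pvSsum_succ_top (t a b : Nat) (h : a ≤ b + 1) :
    pvSsum t a (b + 1) = pvSsum t a b + Nat.choose t (b + 1) := by
  unfold pvSsum
  rw [← Finset.insert_Icc_right_eq_Icc_add_one h, Finset.sum_insert (by simp)]
  ring

theorem pvSsum_succ_bot (t a b : Nat) (h : a ≤ b) :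
    pvSsum t a b = Nat.choose t a + pvSsum t (a + 1) b := by
  unfold pvSsum
  rw [← Finset.insert_Icc_succ_left_eq_Icc h, Finset.sum_insert (by simp)]
  simp [Order.succ_eq_add_one]

-- A's loop invariant: after processing k = 1 ... m the state is (Σ_{j=1}^{m} C(T,j), C(T,m)).
theorem pvA_fold (T : Nat) (m : Nat) (hm : m < T) :
    ((PySem.List.pyRange 1 ((m : Int) + 1) 1).foldl
      (fun (st : Int × Int) (k : Int) =>
        let t := PySem.Int.floordiv (st.2 * ((T : Int) - k + 1)) k
        (st.1 + t, t))
      (0, 1)) = (((pvSsum T 1 m : Nat) : Int), ((Nat.choose T m : Nat) : Int)) := by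
  induction m with
  | zero =>
    rw [PySem.List.pyRange_one_eq_nil (by simp)]
    simp [pvSsum]
  | succ m ih =>
    have hb : ((m + 1 : Nat) : Int) + 1 = ((m : Int) + 1) + 1 := by push_cast; ring
    rw [hb, PySem.List.pyRange_one_succ_right (by omega), List.foldl_append, ih (by omega)]
    simp only [List.foldl_cons, List.foldl_nil]
    have h1 : (T : Int) - ((m : Int) + 1) + 1 = ((T - m : Nat) : Int) := by
      have hmT : m ≤ T := by omega
      push_cast [hmT]; ring
    have h3 : ((m : Int) + 1) = ((m + 1 : Nat) : Int) := by push_cast; ring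
    have hnat : Nat.choose T m * (T - m) = Nat.choose T (m + 1) * (m + 1) :=
      (Nat.choose_succ_right_eq T m).symm
    have ht : PySem.Int.floordiv (((Nat.choose T m : Nat) : Int) * ((T : Int) - ((m : Int) + 1) + 1)) ((m : Int) + 1)
        = ((Nat.choose T (m + 1) : Nat) : Int) := by
      rw [h1, h3, ← Nat.cast_mul, PySem.Int.floordiv_natCast, hnat,
        Nat.mul_div_cancel _ (Nat.succ_pos m)]
    simp only [ht]
    have hsum : pvSsum T 1 (m + 1) = pvSsum T 1 m + Nat.choose T (m + 1) :=
      pvSsum_succ_top T 1 m (by omega)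
    rw [hsum]
    push_cast
    ring_nf

-- B's while-loop invariant, counting down from k = j to 1 with fuel j: a state (N, D) at
-- level j+1 — N * descFactorial T (j+1) = E! * (Σ_{i=j+1}^{E} C(T,i)) and D * (j+1)! = E! —
-- is carried to a state satisfying the level-1 invariant.
theorem pvHorner_inv (T E : Nat) (hET : E < T) :
    ∀ (j : Nat) (N D : Nat), j + 1 ≤ E →
      N * Nat.descFactorial T (j + 1) = Nat.factorial E * pvSsum T (j + 1) E →
      D * Nat.factorial (j + 1) = Nat.factorial E →
      ∃ N' D' : Nat,
        pvHornerLoop (T : Int) (j : Int) (N : Int) (D : Int) j = (((N' : Nat) : Int), ((D' : Nat) : Int)) ∧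
        N' * Nat.descFactorial T 1 = Nat.factorial E * pvSsum T 1 E ∧
        D' * Nat.factorial 1 = Nat.factorial E := by
  intro j
  induction j with
  | zero =>
    intro N D hE hN hD
    exact ⟨N, D, rfl, hN, hD⟩
  | succ j ih =>
    intro N D hE hN hD
    have hk : j + 1 ≤ T := by omega
    -- one step: k = j+1, new state at level j+1
    have hstep : pvHornerLoop (T : Int) ((j + 1 : Nat) : Int) (N : Int) (D : Int) (j + 1)
        = pvHornerLoop (T : Int) (j : Int)
            ((D * (j + 2) + (T - (j + 1)) * N : Nat) : Int) ((D * (j + 2) : Nat) : Int) j := by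
      show pvHornerLoop (T : Int) (((j + 1 : Nat) : Int) - 1)
          ((D : Int) * (((j + 1 : Nat) : Int) + 1) + ((T : Int) - ((j + 1 : Nat) : Int)) * (N : Int))
          ((D : Int) * (((j + 1 : Nat) : Int) + 1)) j = _
      have e1 : ((j + 1 : Nat) : Int) - 1 = ((j : Nat) : Int) := by push_cast; ring
      have e2 : (D : Int) * (((j + 1 : Nat) : Int) + 1) + ((T : Int) - ((j + 1 : Nat) : Int)) * (N : Int)
          = ((D * (j + 2) + (T - (j + 1)) * N : Nat) : Int) := by push_cast [hk]; ring
      have e3 : (D : Int) * (((j + 1 : Nat) : Int) + 1) = ((D * (j + 2) : Nat) : Int) := by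
        push_cast; ring
      rw [e1, e2, e3]
    -- the new state satisfies the level-(j+1) invariant
    have hff : Nat.descFactorial T (j + 1 + 1) = (T - (j + 1)) * Nat.descFactorial T (j + 1) :=
      Nat.descFactorial_succ T (j + 1)
    have hchoose : Nat.descFactorial T (j + 1) = Nat.factorial (j + 1) * Nat.choose T (j + 1) :=
      Nat.descFactorial_eq_factorial_mul_choose T (j + 1)
    have hsum : pvSsum T (j + 1) E = Nat.choose T (j + 1) + pvSsum T (j + 1 + 1) E :=
      pvSsum_succ_bot T (j + 1) E (by omega)
    have hN' : (D * (j + 2) + (T - (j + 1)) * N) * Nat.descFactorial T (j + 1)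
        = Nat.factorial E * pvSsum T (j + 1) E := by
      calc (D * (j + 2) + (T - (j + 1)) * N) * Nat.descFactorial T (j + 1)
          = D * (j + 2) * (Nat.factorial (j + 1) * Nat.choose T (j + 1))
              + N * ((T - (j + 1)) * Nat.descFactorial T (j + 1)) := by
            rw [← hchoose]; ring
        _ = (D * Nat.factorial (j + 1 + 1)) * Nat.choose T (j + 1)
              + N * Nat.descFactorial T (j + 1 + 1) := by
            have hf2 : Nat.factorial (j + 1 + 1) = (j + 2) * Nat.factorial (j + 1) :=
              Nat.factorial_succ (j + 1)
            rw [← hff, hf2]; ring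
        _ = Nat.factorial E * Nat.choose T (j + 1) + Nat.factorial E * pvSsum T (j + 1 + 1) E := by
            rw [hD, hN]
        _ = Nat.factorial E * pvSsum T (j + 1) E := by rw [hsum]; ring
    have hD' : (D * (j + 2)) * Nat.factorial (j + 1) = Nat.factorial E := by
      calc (D * (j + 2)) * Nat.factorial (j + 1) = D * ((j + 2) * Nat.factorial (j + 1)) := by ring
        _ = D * Nat.factorial (j + 1 + 1) := by rw [Nat.factorial_succ (j + 1)]
        _ = Nat.factorial E := hD
    rw [hstep]
    exact ih _ _ (by omega) hN' hD'

-- ===== VERDICT (by name: the statement is the Claim_ definition above) =====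
theorem max_determinable_height_spec : Claim_equal_max_determinable_height := by
  intro eggs tries _ hpre
  unfold Spec_max_determinable_height max_determinable_height max_determinable_height_alt
  by_cases hge : eggs ≥ tries
  · rw [if_pos hge, if_pos hge]
  · rw [if_neg hge, if_neg hge]
    have hlt : eggs < tries := by omega
    by_cases hez : eggs ≤ 0
    · rw [if_pos hez, PySem.List.pyRange_one_eq_nil (by omega)]
      rfl
    · rw [if_neg hez]
      obtain ⟨E, rfl⟩ : ∃ E : Nat, (E : Int) = eggs :=
        ⟨eggs.toNat, Int.toNat_of_nonneg (by omega)⟩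
      obtain ⟨T, rfl⟩ : ∃ T : Nat, (T : Int) = tries :=
        ⟨tries.toNat, Int.toNat_of_nonneg (by omega)⟩
      have hE1 : 1 ≤ E := by omega
      have hET : E < T := by exact_mod_cast hlt
      rw [pvA_fold T E hET]
      -- the initial state (1, 1) at level E (= (E-1)+1) satisfies the invariant
      obtain ⟨j, hj⟩ : ∃ j : Nat, E = j + 1 := ⟨E - 1, by omega⟩
      have hNin : 1 * Nat.descFactorial T (j + 1) = Nat.factorial E * pvSsum T (j + 1) E := by
        rw [hj, one_mul, pvSsum_self, Nat.descFactorial_eq_factorial_mul_choose]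
      have hDin : 1 * Nat.factorial (j + 1) = Nat.factorial E := by rw [hj, one_mul]
      obtain ⟨N', D', hloop, hN', hD'⟩ :=
        pvHorner_inv T E hET j 1 1 (by omega) hNin hDin
      have harg : (E : Int) - 1 = ((j : Nat) : Int) := by rw [hj]; push_cast; ring
      simp only [Nat.cast_one] at hloop
      rw [harg, Int.toNat_natCast, hloop]
      simp only []
      rw [Nat.descFactorial_one] at hN'
      rw [Nat.factorial_one, mul_one] at hD'
      subst hD'
      have hTN : T * N' = Nat.factorial E * pvSsum T 1 E := by
        calc T * N' = N' * T := Nat.mul_comm T N'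
          _ = Nat.factorial E * pvSsum T 1 E := hN'
      rw [← Nat.cast_mul, PySem.Int.floordiv_natCast, hTN,
        Nat.mul_div_cancel_left _ (Nat.factorial_pos E)]
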